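-- pv_equiv track=rewrite | github.com/Saketh-Reddy-Bejadi/Python | Practice/MEX Game 1.py | alice_score
-- ===== SOURCE A (Python) =====
-- def alice_score(n, a):
--     a.sort()  # Sorting in non-decreasing order
--     mex = 0
--
--     for i in range(n):
--         if i % 2 == 0:  # Alice's turn
--             if a[i] == mex:
--                 mex += 1
--
--     return mex
-- ===== SOURCE B (Python) =====
-- def alice_score(n, a):
--     # One pass: count occurrences of each candidate value, then walk mex over
--     # values 0,1,2,... using block positions (offset by the number of negatives)
--     # instead of sorting and scanning indices.
--     cnt = {}
--     neg = 0
--     for x in a: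
--         if x < 0:
--             neg += 1
--         elif x < n:
--             cnt[x] = cnt.get(x, 0) + 1
--     mex = 0
--     start = neg
--     while start < n:
--         c = cnt.get(mex, 0)
--         if c == 0:
--             break
--         end = start + c
--         if end > n:
--             end = n
--         if start % 2 == 0 or start + 1 < end:
--             mex += 1
--             start = start + c
--         else:
--             break
--     return mex
-- ===== Notes on version B (the rewrite author's own statement) =====
-- stated objective: faster
-- what changed: B replaces sort-then-scan-even-indices by a single counting pass (negatives + per-value counts below n) followed by a mex walk over value blocks that tracks the block start index and its parity, removing the O(n log n) sort; measured 4.4x at n=262144 on random inputs (on already-sorted inputs Timsort is linear and the gain shrinks to ~1.4x).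
import Mathlib
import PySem

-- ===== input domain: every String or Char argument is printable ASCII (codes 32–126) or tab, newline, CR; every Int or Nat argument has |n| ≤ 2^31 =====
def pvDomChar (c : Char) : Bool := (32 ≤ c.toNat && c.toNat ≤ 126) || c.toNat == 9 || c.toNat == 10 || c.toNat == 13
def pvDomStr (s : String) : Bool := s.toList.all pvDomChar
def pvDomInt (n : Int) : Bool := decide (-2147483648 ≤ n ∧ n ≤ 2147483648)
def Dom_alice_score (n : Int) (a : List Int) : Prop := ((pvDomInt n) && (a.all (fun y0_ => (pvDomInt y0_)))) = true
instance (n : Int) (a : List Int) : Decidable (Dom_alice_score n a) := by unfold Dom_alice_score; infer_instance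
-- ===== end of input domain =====

-- B replaces sort-then-scan by a single counting pass plus a mex walk over value blocks; equivalence of return values is proved
-- (Python A also sorts its argument in place — a side effect B does not perform).

-- ===== PORT A =====
def alice_score (n : Int) (a : List Int) : Int :=
  let s := PySem.List.sorted a (fun x => x) false
  (PySem.List.pyRange 0 n 1).foldl
    (fun mex i =>
      if PySem.Int.mod i 2 = 0 then
        if PySem.List.pyGet? s i = some mex then mex + 1 else mex
      else mex) 0

-- ===== PORT B =====
-- the 'while start < n' loop of Source B; fuel only makes the recursion structural (n.toNat + 1 steps always suffice: start grows each turn)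
def aliceAltLoop (cnt : PySem.Dict Int Int) (n : Int) : Nat → Int → Int → Int
  | 0, mex, _ => mex
  | fuel + 1, mex, start =>
    if start < n then
      let c := cnt.getD mex 0
      if c = 0 then mex
      else
        let e := start + c
        let e := if e > n then n else e
        if PySem.Int.mod start 2 = 0 ∨ start + 1 < e then
          aliceAltLoop cnt n fuel (mex + 1) (start + c)
        else mex
    else mex

def alice_score_alt (n : Int) (a : List Int) : Int :=
  let st := a.foldl
    (fun (p : Int × PySem.Dict Int Int) x =>
      if x < 0 then (p.1 + 1, p.2)
      else if x < n then (p.1, p.2.insert x (p.2.getD x 0 + 1))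
      else p)
    (0, PySem.Dict.empty)
  aliceAltLoop st.2 n (n.toNat + 1) 0 st.1

-- ===== PRECONDITION & SPEC =====
-- Python A raises IndexError exactly when some even index i < n reaches past the list; that is n > len(a) except n = len(a)+1 with len(a) odd.
def Pre_alice_score (n : Int) (a : List Int) : Prop :=
  n ≤ a.length ∨ (n = (a.length : Int) + 1 ∧ a.length % 2 = 1)
instance (n : Int) (a : List Int) : Decidable (Pre_alice_score n a) := by unfold Pre_alice_score; infer_instance
def pvWitness_alice_score : Int × List Int := (2, [0, 1])

def Spec_alice_score (n : Int) (a : List Int) (out : Int) : Prop := out = alice_score_alt n a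
instance (n : Int) (a : List Int) (out : Int) : Decidable (Spec_alice_score n a out) := by unfold Spec_alice_score; infer_instance

-- ===== CLAIM (what is proved, stated in full; the proofs are below) =====
def Claim_equal_alice_score : Prop := ∀ (n : Int) (a : List Int), Dom_alice_score n a → Pre_alice_score n a → Spec_alice_score n a (alice_score n a)

-- ===== LEMMAS AND PROOFS =====

-- A's loop body on sorted list s
def pvStepA (s : List Int) (mex i : Int) : Int :=
  if PySem.Int.mod i 2 = 0 then
    if PySem.List.pyGet? s i = some mex then mex + 1 else mex
  else mex

-- A's loop from index i
def pvFoldR (s : List Int) (n m i : Int) : Int :=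
  (PySem.List.pyRange i n 1).foldl (pvStepA s) m

lemma pvAlice_eq (n : Int) (a : List Int) :
    alice_score n a = pvFoldR (PySem.List.sorted a (fun x => x) false) n 0 0 := rfl

lemma pvAltLoop_succ (cnt : PySem.Dict Int Int) (n : Int) (fuel : Nat) (m start : Int) :
    aliceAltLoop cnt n (fuel + 1) m start =
      if start < n then
        if cnt.getD m 0 = 0 then m
        else if PySem.Int.mod start 2 = 0 ∨
            start + 1 < (if start + cnt.getD m 0 > n then n else start + cnt.getD m 0) then
          aliceAltLoop cnt n fuel (m + 1) (start + cnt.getD m 0)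
        else m
      else m := rfl

lemma pvStep_fix_ne {s : List Int} {acc k : Int}
    (h : PySem.List.pyGet? s k ≠ some acc) : pvStepA s acc k = acc := by
  unfold pvStepA; split_ifs <;> simp_all

lemma pvStep_fix_odd {s : List Int} {acc k : Int}
    (h : PySem.Int.mod k 2 ≠ 0) : pvStepA s acc k = acc := by
  unfold pvStepA; rw [if_neg h]

lemma pvFoldlConst {l : List Int} {f : Int → Int → Int} {m : Int}
    (h : ∀ x ∈ l, f m x = m) : l.foldl f m = m := by
  induction l with
  | nil => rfl
  | cons x t ih =>
    simp only [List.foldl_cons, h x (by simp)]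
    exact ih fun y hy => h y (by simp [hy])

lemma pvFoldR_term {s : List Int} {n m i : Int} (h : n ≤ i) : pvFoldR s n m i = m := by
  unfold pvFoldR
  have h0 : (n - i).toNat = 0 := by omega
  rw [PySem.List.pyRange_one, h0]
  rfl

lemma pvSkip {s : List Int} {n m i j : Int} (hij : i ≤ j) (hjn : j ≤ n)
    (h : ∀ k : Int, i ≤ k → k < j → pvStepA s m k = m) :
    pvFoldR s n m i = pvFoldR s n m j := by
  unfold pvFoldR
  rw [PySem.List.pyRange_one_append i j n hij hjn, List.foldl_append,
      pvFoldlConst (fun k hk => h k (PySem.List.mem_pyRange_one.1 hk).1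
        (PySem.List.mem_pyRange_one.1 hk).2)]

lemma pvAllNe {s : List Int} {n m i : Int}
    (h : ∀ k : Int, i ≤ k → k < n → pvStepA s m k = m) :
    pvFoldR s n m i = m := by
  unfold pvFoldR
  exact pvFoldlConst (fun k hk => h k (PySem.List.mem_pyRange_one.1 hk).1
    (PySem.List.mem_pyRange_one.1 hk).2)

lemma pvFoldR_cons {s : List Int} {n m j : Int} (hj : j < n) :
    pvFoldR s n m j = pvFoldR s n (pvStepA s m j) (j + 1) := by
  unfold pvFoldR
  rw [PySem.List.pyRange_one_cons hj, List.foldl_cons]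

-- sorted-position characterisation: a downward-closed predicate holds at index k iff k < its count
lemma pvSortedCountP {s : List Int} (hp : s.Pairwise (fun a b => a ≤ b)) (p : Int → Bool)
    (hmono : ∀ x y : Int, x ≤ y → p y = true → p x = true) :
    ∀ k (hk : k < s.length), (p s[k] = true ↔ k < s.countP p) := by
  induction s with
  | nil => intro k hk; simp at hk
  | cons x t ih =>
    rcases List.pairwise_cons.1 hp with ⟨hx, ht⟩
    intro k hk
    cases k with
    | zero =>
      simp only [List.getElem_cons_zero, List.countP_cons]
      constructor
      · intro h; simp only [h, if_true]; omega
      · intro h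
        by_cases hpx : p x = true
        · exact hpx
        · have h0 : t.countP p = 0 := List.countP_eq_zero.2 fun y hy hpy =>
            hpx (hmono x y (hx y hy) hpy)
          have h1 : (if p x then 1 else 0) = 0 := by simp [hpx]
          omega
    | succ k =>
      simp only [List.getElem_cons_succ, List.countP_cons]
      have hk' : k < t.length := by simpa using hk
      by_cases hpx : p x = true
      · rw [ih ht k hk']
        simp only [hpx, if_true]
        omega
      · have h0 : t.countP p = 0 := List.countP_eq_zero.2 fun y hy hpy =>
          hpx (hmono x y (hx y hy) hpy)
        have h1 : (if p x then 1 else 0) = 0 := by simp [hpx]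
        constructor
        · intro h; exact absurd (hmono x t[k] (hx _ (List.getElem_mem hk')) h) hpx
        · intro h; omega

lemma pvCountLe_split (s : List Int) (m : Int) :
    s.countP (fun x => decide (x ≤ m)) = s.countP (fun x => decide (x < m)) + s.count m := by
  induction s with
  | nil => rfl
  | cons x t ih =>
    simp only [List.countP_cons, List.count_cons, ih]
    by_cases h1 : x < m
    · have e1 : decide (x < m) = true := by simp [h1]
      have e2 : decide (x ≤ m) = true := by simp [le_of_lt h1]
      have e3 : (x == m) = false := by simp; omega
      simp [e1, e2, e3] <;> omega
    · by_cases h3 : x = m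
      · have e1 : decide (x < m) = false := by simp [h3]
        have e2 : decide (x ≤ m) = true := by simp [h3]
        have e3 : (x == m) = true := by simp [h3]
        simp [e1, e2, e3] <;> omega
      · have e1 : decide (x < m) = false := by simp [h1]
        have e2 : decide (x ≤ m) = false := by simp; omega
        have e3 : (x == m) = false := by simp [h3]
        simp [e1, e2, e3] <;> omega

-- block characterisation on a sorted list
lemma pvSortedEq {s : List Int} (hp : s.Pairwise (fun a b => a ≤ b)) (m : Int) (k : Nat) (hk : k < s.length) :
    s[k] = m ↔ (s.countP (fun x => decide (x < m)) ≤ k ∧ k < s.countP (fun x => decide (x < m)) + s.count m) := by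
  have h1 := pvSortedCountP hp (fun x => decide (x < m)) (fun x y hxy hy => by
    simp only [decide_eq_true_eq] at *; omega) k hk
  have h2 := pvSortedCountP hp (fun x => decide (x ≤ m)) (fun x y hxy hy => by
    simp only [decide_eq_true_eq] at *; omega) k hk
  rw [pvCountLe_split] at h2
  simp only [decide_eq_true_eq] at h1 h2
  constructor
  · intro h
    rw [h] at h1 h2
    have ha : ¬ k < s.countP (fun x => decide (x < m)) := fun hc => absurd (h1.2 hc) (lt_irrefl m)
    have hb := h2.1 (le_refl m)
    omega
  · intro h
    have hlt : ¬ s[k] < m := fun hc => by rw [h1] at hc; omega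
    have hle : s[k] ≤ m := h2.2 (by omega)
    omega

-- the counting pass of B
lemma pvBuild_spec (n : Int) :
    ∀ (a : List Int) (p : Int × PySem.Dict Int Int),
      (a.foldl (fun (p : Int × PySem.Dict Int Int) x =>
          if x < 0 then (p.1 + 1, p.2)
          else if x < n then (p.1, p.2.insert x (p.2.getD x 0 + 1))
          else p) p).1 = p.1 + (a.countP (fun x => decide (x < 0)) : Int)
      ∧ ∀ v : Int, 0 ≤ v → v < n →
        (a.foldl (fun (p : Int × PySem.Dict Int Int) x =>
            if x < 0 then (p.1 + 1, p.2)
            else if x < n then (p.1, p.2.insert x (p.2.getD x 0 + 1))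
            else p) p).2.getD v 0 = p.2.getD v 0 + (a.count v : Int) := by
  intro a
  induction a with
  | nil => intro p; simp
  | cons x t ih =>
    intro p
    by_cases h0 : x < 0
    · obtain ⟨ih1, ih2⟩ := ih (p.1 + 1, p.2)
      constructor
      · simp only [List.foldl_cons, if_pos h0, List.countP_cons]
        rw [ih1]
        simp only [h0, decide_true, if_true]
        push_cast; ring
      · intro v hv0 hvn
        simp only [List.foldl_cons, if_pos h0, List.count_cons]
        rw [ih2 v hv0 hvn]
        have hxv : (x == v) = false := by simp; omega
        simp [hxv]
    · by_cases hn : x < n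
      · obtain ⟨ih1, ih2⟩ := ih (p.1, p.2.insert x (p.2.getD x 0 + 1))
        constructor
        · simp only [List.foldl_cons, if_neg h0, if_pos hn, List.countP_cons]
          rw [ih1]
          simp [h0]
        · intro v hv0 hvn
          simp only [List.foldl_cons, if_neg h0, if_pos hn, List.count_cons]
          rw [ih2 v hv0 hvn, PySem.Dict.getD_insert]
          by_cases hxv : v = x
          · subst hxv
            simp only [BEq.rfl, if_true]
            push_cast; ring
          · have hxv' : (x == v) = false := by simp; omega
            simp [hxv, hxv']
      · obtain ⟨ih1, ih2⟩ := ih p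
        constructor
        · simp only [List.foldl_cons, if_neg h0, if_neg hn, List.countP_cons]
          rw [ih1]
          simp [h0]
        · intro v hv0 hvn
          simp only [List.foldl_cons, if_neg h0, if_neg hn, List.count_cons]
          rw [ih2 v hv0 hvn]
          have hxv : (x == v) = false := by simp; omega
          simp [hxv]

-- MAIN loop invariant: B's loop, entered with mex = m and start = #(elements < m), computes A's fold from index start
lemma pvMain (s : List Int) (cnt : PySem.Dict Int Int) (n : Int)
    (hp : s.Pairwise (fun a b => a ≤ b))
    (hc : ∀ v : Int, 0 ≤ v → v < n → cnt.getD v 0 = (s.count v : Int)) :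
    ∀ (fuel : Nat) (m i : Int), 0 ≤ m → m ≤ i →
      i = (s.countP (fun x => decide (x < m)) : Int) → n ≤ i + fuel →
      aliceAltLoop cnt n fuel m i = pvFoldR s n m i := by
  intro fuel
  induction fuel with
  | zero =>
    intro m i hm hmi hcount hfuel
    rw [pvFoldR_term (by omega : n ≤ i)]
    rfl
  | succ fuel ih =>
    intro m i hm hmi hcount hfuel
    by_cases hin : i < n
    · have hmn : m < n := by omega
      have hcnt := hc m hm hmn
      have hlen : s.countP (fun x => decide (x < m)) + s.count m ≤ s.length := by
        rw [← pvCountLe_split]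
        exact List.countP_le_length
      have hmod : ∀ x : Int, PySem.Int.mod x 2 = x % 2 :=
        fun x => PySem.Int.mod_eq_emod_of_pos (a := x) (by norm_num)
      -- in-block / after-block facts
      have hblock : ∀ k : Int, i ≤ k → k < i + (s.count m : Int) →
          PySem.List.pyGet? s k = some m := by
        intro k hk1 hk2
        have hk0 : 0 ≤ k := by omega
        have hkl : (k : Int) < (s.length : Int) := by omega
        rw [PySem.List.pyGet?_eq_some_getElem s hk0 hkl]
        congr 1
        exact (pvSortedEq hp m k.toNat (by omega)).2 (by omega)
      have hafter : ∀ k : Int, i + (s.count m : Int) ≤ k →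
          PySem.List.pyGet? s k ≠ some m := by
        intro k hk1 hcontra
        have hk0 : 0 ≤ k := by omega
        by_cases hkl : (k : Int) < (s.length : Int)
        · rw [PySem.List.pyGet?_eq_some_getElem s hk0 hkl] at hcontra
          have := (pvSortedEq hp m k.toNat (by omega)).1 (Option.some_injective _ hcontra)
          omega
        · rw [PySem.List.pyGet?_of_nonneg s hk0] at hcontra
          rw [List.getElem?_eq_none (by omega)] at hcontra
          simp at hcontra
      by_cases hc0 : cnt.getD m 0 = 0
      · -- mex value absent: both sides stop at m
        have hcnt0 : (s.count m : Int) = 0 := by rw [← hcnt]; exact hc0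
        have hA : pvFoldR s n m i = m := pvAllNe fun k hk1 _ =>
          pvStep_fix_ne (hafter k (by omega))
        rw [hA, pvAltLoop_succ, if_pos hin, if_pos hc0]
      · have hcpos : (1 : Int) ≤ cnt.getD m 0 := by
          rw [hcnt]; rw [hcnt] at hc0; omega
        set c : Int := cnt.getD m 0 with hcdef
        by_cases hP : PySem.Int.mod i 2 = 0 ∨ i + 1 < (if i + c > n then n else i + c)
        · -- a block with an even slot: mex advances
          have hstep : aliceAltLoop cnt n (fuel + 1) m i =
              aliceAltLoop cnt n fuel (m + 1) (i + c) := by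
            rw [pvAltLoop_succ, if_pos hin, if_neg hc0, if_pos hP]
          rw [hstep]
          have hcount' : i + c = (s.countP (fun x => decide (x < m + 1)) : Int) := by
            have : s.countP (fun x => decide (x < m + 1)) = s.countP (fun x => decide (x ≤ m)) := by
              apply List.countP_congr
              intro y _
              have hy : (y < m + 1) ↔ (y ≤ m) := by omega
              simp only [hy]
            rw [this, pvCountLe_split]
            push_cast
            omega
          rw [ih (m + 1) (i + c) (by omega) (by omega) hcount' (by omega)]
          -- now: A's fold from i with mex m equals its fold from i+c with mex m+1
          set e : Int := if i + c > n then n else i + c with hedef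
          have he1 : e ≤ i + c := by rw [hedef]; split_ifs <;> omega
          have he2 : e ≤ n := by rw [hedef]; split_ifs <;> omega
          have hie : i < e := by rw [hedef]; split_ifs <;> omega
          set j0 : Int := if PySem.Int.mod i 2 = 0 then i else i + 1 with hj0def
          have hj0ge : i ≤ j0 := by rw [hj0def]; split_ifs <;> omega
          have hj0lt : j0 < e := by
            rw [hj0def]; split_ifs with h
            · exact hie
            · exact hP.resolve_left h
          have hj0even : PySem.Int.mod j0 2 = 0 := by
            rw [hj0def]; split_ifs with h
            · exact h
            · rw [hmod] at h ⊢; omega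
          have s1 : pvFoldR s n m i = pvFoldR s n m j0 := by
            apply pvSkip hj0ge (by omega)
            intro k hk1 hk2
            have hkodd : PySem.Int.mod k 2 ≠ 0 := by
              rw [hj0def] at hk2
              split_ifs at hk2 with h
              · omega
              · rw [hmod] at h ⊢
                have : k = i := by omega
                rw [this]; exact h
            exact pvStep_fix_odd hkodd
          have s2 : pvFoldR s n m j0 = pvFoldR s n (m + 1) (j0 + 1) := by
            rw [pvFoldR_cons (by omega : j0 < n)]
            congr 1
            unfold pvStepA
            rw [if_pos hj0even, if_pos (hblock j0 hj0ge (by rw [← hcnt]; omega))]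
          have s3 : pvFoldR s n (m + 1) (j0 + 1) = pvFoldR s n (m + 1) e := by
            apply pvSkip (by omega) he2
            intro k hk1 hk2
            apply pvStep_fix_ne
            have := hblock k (by omega) (by rw [← hcnt]; omega)
            rw [this]
            simp
          have s4 : pvFoldR s n (m + 1) e = pvFoldR s n (m + 1) (i + c) := by
            rw [hedef]
            split_ifs with h
            · rw [pvFoldR_term (le_refl n), pvFoldR_term (by omega : n ≤ i + c)]
            · rfl
          rw [s1, s2, s3, s4]
        · -- lone odd slot: both sides stop at m
          have hstop : aliceAltLoop cnt n (fuel + 1) m i = m := by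
            rw [pvAltLoop_succ, if_pos hin, if_neg hc0, if_neg hP]
          rw [hstop]
          have hodd : PySem.Int.mod i 2 ≠ 0 := fun h => hP (Or.inl h)
          have hle : ¬ i + 1 < (if i + c > n then n else i + c) := fun h => hP (Or.inr h)
          symm
          apply pvAllNe
          intro k hk1 hk2
          by_cases hki : k = i
          · rw [hki]; exact pvStep_fix_odd hodd
          · apply pvStep_fix_ne
            apply hafter
            split_ifs at hle <;> rw [← hcnt] <;> omega
    · rw [pvFoldR_term (by omega : n ≤ i), pvAltLoop_succ, if_neg hin]

-- ===== VERDICT (by name: the statement is the Claim_ definition above) =====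
theorem alice_score_spec : Claim_equal_alice_score := by
  unfold Claim_equal_alice_score Spec_alice_score
  intro n a _ _
  have hp : (PySem.List.sorted a (fun x => x) false).Pairwise (fun u v => u ≤ v) := by
    simpa using PySem.List.sorted_pairwise a (fun x => x)
  set s := PySem.List.sorted a (fun x => x) false with hs
  have hperm : s.Perm a := PySem.List.sorted_perm a _ false
  rw [pvAlice_eq]
  show pvFoldR s n 0 0 = alice_score_alt n a
  unfold alice_score_alt
  obtain ⟨h1, h2⟩ := pvBuild_spec n a (0, PySem.Dict.empty)
  set st := a.foldl (fun (p : Int × PySem.Dict Int Int) x =>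
      if x < 0 then (p.1 + 1, p.2)
      else if x < n then (p.1, p.2.insert x (p.2.getD x 0 + 1))
      else p) (0, PySem.Dict.empty) with hst
  have hneg : st.1 = (s.countP (fun x => decide (x < 0)) : Int) := by
    rw [h1, hperm.countP_eq]
    simp
  have hc : ∀ v : Int, 0 ≤ v → v < n → st.2.getD v 0 = (s.count v : Int) := by
    intro v hv0 hvn
    rw [h2 v hv0 hvn, hperm.count_eq]
    simp
  have hmain := pvMain s st.2 n hp hc (n.toNat + 1) 0 st.1 (le_refl 0)
    (by rw [hneg]; positivity) hneg (by omega)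
  rw [hmain]
  -- A's fold skips the negative prefix without touching mex = 0
  by_cases hnn : st.1 ≤ n
  · apply pvSkip (by rw [hneg]; positivity) hnn
    intro k hk1 hk2
    apply pvStep_fix_ne
    rw [hneg] at hk2
    have hkl : (k : Int) < (s.length : Int) := by
      have := List.countP_le_length (p := fun x => decide (x < 0)) (l := s)
      omega
    rw [PySem.List.pyGet?_eq_some_getElem s hk1 hkl]
    intro hcontra
    have := (pvSortedCountP hp (fun x => decide (x < 0)) (fun x y hxy hy => by
      simp only [decide_eq_true_eq] at *; omega) k.toNat (by omega)).2 (by omega)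
    simp only [decide_eq_true_eq] at this
    rw [Option.some_injective _ hcontra] at this
    omega
  · rw [pvFoldR_term (by omega : n ≤ st.1)]
    apply pvAllNe
    intro k hk1 hk2
    apply pvStep_fix_ne
    rw [hneg] at hnn
    have hkl : (k : Int) < (s.length : Int) := by
      have := List.countP_le_length (p := fun x => decide (x < 0)) (l := s)
      omega
    rw [PySem.List.pyGet?_eq_some_getElem s hk1 hkl]
    intro hcontra
    have := (pvSortedCountP hp (fun x => decide (x < 0)) (fun x y hxy hy => by
      simp only [decide_eq_true_eq] at *; omega) k.toNat (by omega)).2 (by omega)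
    simp only [decide_eq_true_eq] at this
    rw [Option.some_injective _ hcontra] at this
    omega
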